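-- pv_equiv track=rewrite | github.com/anastasiia-denysenko/Applied-Algorithms-Uni | lab_6/lab_6.py | to_insertion_counting
-- ===== SOURCE A (Python) =====
-- def to_insertion_counting(lst:list, copies:int, comparisons:int) -> tuple:
--     for i in range(1, len(lst)):
--         temp = lst[i]
--         copies += 1
--         j = i - 1
--         while j >= 0 and temp < lst[j]:
--             comparisons += 1
--             lst[j + 1] = lst[j]
--             j -= 1
--         lst[j + 1] = temp
--     return lst, copies, comparisons
-- ===== SOURCE B (Python) =====
-- def _insert_sorted(out, temp):
--     # insert temp into the sorted list out (new list); returns (new list, #elements shifted past)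
--     pos = 0
--     while pos < len(out) and not temp < out[pos]:
--         pos += 1
--     return out[:pos] + [temp] + out[pos:], len(out) - pos
--
-- def to_insertion_counting(lst, copies, comparisons):
--     out = lst[:1]
--     for temp in lst[1:]:
--         copies += 1
--         out, shifts = _insert_sorted(out, temp)
--         comparisons += shifts
--     lst[:] = out
--     return lst, copies, comparisons
-- ===== Notes on version B (the rewrite author's own statement) =====
-- stated objective: faster
-- what changed: Replaces in-place index/shift insertion sort with a rebuild that inserts each element into a growing sorted list via a front-to-back position scan and slice concatenation, deriving the comparison count as (prefix length - insertion position) instead of counting backward shifts.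
import Mathlib
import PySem

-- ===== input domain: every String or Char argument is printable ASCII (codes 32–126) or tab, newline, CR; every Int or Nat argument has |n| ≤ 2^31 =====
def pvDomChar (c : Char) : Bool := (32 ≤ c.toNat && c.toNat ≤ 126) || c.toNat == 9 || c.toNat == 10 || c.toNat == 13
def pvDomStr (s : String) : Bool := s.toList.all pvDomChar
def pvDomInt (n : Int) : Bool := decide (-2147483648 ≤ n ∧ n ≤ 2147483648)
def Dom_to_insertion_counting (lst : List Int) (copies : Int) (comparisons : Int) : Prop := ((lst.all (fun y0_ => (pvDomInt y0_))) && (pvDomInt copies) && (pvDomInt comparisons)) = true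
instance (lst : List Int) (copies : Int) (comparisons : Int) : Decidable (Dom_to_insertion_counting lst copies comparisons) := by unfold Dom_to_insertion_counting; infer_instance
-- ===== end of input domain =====

-- B rebuilds the sorted prefix by inserting each element at a position found by a front-to-back scan,
-- instead of A's in-place backward shift loop; return values proved equal (A mutates lst in place,
-- B writes the same content back with lst[:] = out, so the caller-visible mutation is the same).

-- ===== PORT A =====
-- the inner `while j >= 0 and temp < lst[j]` shift loop
def pvInnerA (a : List Int) (temp : Int) (j : Int) (cm : Int) : List Int × Int × Int :=
  if h : 0 ≤ j ∧ temp < PySem.List.pyGetD a j 0 then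
    pvInnerA (PySem.List.pySetD a (j + 1) (PySem.List.pyGetD a j 0)) temp (j - 1) (cm + 1)
  else (a, j, cm)
termination_by (j + 1).toNat
decreasing_by omega

-- one iteration of the outer `for i in range(1, len(lst))` loop (ends with `lst[j + 1] = temp`)
def pvStepA (st : List Int × Int × Int) (i : Int) : List Int × Int × Int :=
  let temp := PySem.List.pyGetD st.1 i 0
  let r := pvInnerA st.1 temp (i - 1) st.2.2
  (PySem.List.pySetD r.1 (r.2.1 + 1) temp, st.2.1 + 1, r.2.2)

def to_insertion_counting (lst : List Int) (copies : Int) (comparisons : Int) : List Int × Int × Int :=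
  (PySem.List.pyRange 1 (lst.length : Int) 1).foldl pvStepA (lst, copies, comparisons)

-- ===== PORT B =====
-- the position scan `while pos < len(out) and not temp < out[pos]: pos += 1`
def pvFindPos (out : List Int) (temp : Int) : Nat :=
  match out with
  | [] => 0
  | x :: xs => if temp < x then 0 else pvFindPos xs temp + 1

-- `out[:pos] + [temp] + out[pos:], len(out) - pos`
def pvInsertSorted (out : List Int) (temp : Int) : List Int × Int :=
  let pos := pvFindPos out temp
  (out.take pos ++ temp :: out.drop pos, ((out.length - pos : Nat) : Int))

-- one iteration of B's `for temp in lst[1:]` loop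
def pvStepB (st : List Int × Int × Int) (temp : Int) : List Int × Int × Int :=
  let r := pvInsertSorted st.1 temp
  (r.1, st.2.1 + 1, st.2.2 + r.2)

def to_insertion_counting_alt (lst : List Int) (copies : Int) (comparisons : Int) : List Int × Int × Int :=
  (lst.drop 1).foldl pvStepB (lst.take 1, copies, comparisons)

-- ===== PRECONDITION & SPEC =====
def Spec_to_insertion_counting (lst : List Int) (copies : Int) (comparisons : Int) (out : List Int × Int × Int) : Prop := out = to_insertion_counting_alt lst copies comparisons
instance (lst : List Int) (copies : Int) (comparisons : Int) (out : List Int × Int × Int) : Decidable (Spec_to_insertion_counting lst copies comparisons out) := by unfold Spec_to_insertion_counting; infer_instance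

-- ===== CLAIM (what is proved, stated in full; the proofs are below) =====
def Claim_equal_to_insertion_counting : Prop := ∀ (lst : List Int) (copies : Int) (comparisons : Int), Dom_to_insertion_counting lst copies comparisons → Spec_to_insertion_counting lst copies comparisons (to_insertion_counting lst copies comparisons)

-- ===== LEMMAS AND PROOFS =====

theorem pv_getD_middle (q r : List Int) (b : Int) (s : List Int) :
    (q ++ (r ++ b :: s)).getD (q.length + r.length) 0 = b := by
  induction q with
  | nil => induction r with
    | nil => simp
    | cons a r ih => simpa using ih
  | cons a q ih => simpa [Nat.succ_add] using ih

theorem pv_set_middle (q r : List Int) (b c x : Int) (s : List Int) :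
    (q ++ (r ++ b :: x :: s)).set (q.length + r.length + 1) c = q ++ (r ++ b :: c :: s) := by
  induction q with
  | nil => induction r with
    | nil => simp
    | cons a r ih => simpa using ih
  | cons a q ih =>
    simp only [List.cons_append, List.length_cons]
    rw [show q.length + 1 + r.length + 1 = (q.length + r.length + 1) + 1 from by omega]
    simp [ih]

theorem pv_set_head (q : List Int) (c t : Int) (z : List Int) :
    (q ++ c :: z).set q.length t = q ++ t :: z := by
  induction q with
  | nil => simp
  | cons a q ih => simpa using ih

-- characterization of A's inner shift loop on an array q ++ r ++ s, r being the run of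
-- elements greater than temp sitting immediately left of position |q| + |r|
theorem pvInnerA_spec (r : List Int) : ∀ (q s : List Int) (temp cm : Int), s ≠ [] →
    (∀ x ∈ r, temp < x) → (∀ l ∈ q.getLast?, ¬ temp < l) →
    pvInnerA (q ++ (r ++ s)) temp ((q.length : Int) + (r.length : Int) - 1) cm
      = (q ++ ((r ++ s).headD 0 :: (r ++ s.tail)), (q.length : Int) - 1, cm + r.length) := by
  induction r using List.reverseRecOn with
  | nil =>
    intro q s temp cm hs hr hq
    obtain ⟨sh, st, rfl⟩ : ∃ sh st, s = sh :: st := by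
      cases s with | nil => exact absurd rfl hs | cons a t => exact ⟨a, t, rfl⟩
    rw [pvInnerA]
    rcases q.eq_nil_or_concat with rfl | ⟨q', l, rfl⟩
    · rw [dif_neg (by simp)]
      simp
    · simp only [List.concat_eq_append] at hq ⊢
      have hlen : ((q' ++ [l]).length : Int) + ([] : List Int).length - 1 = ((q'.length : Nat) : Int) := by
        simp
      rw [hlen, dif_neg]
      · simp
      · rintro ⟨-, hlt⟩
        have hget : PySem.List.pyGetD ((q' ++ [l]) ++ ([] ++ sh :: st)) ((q'.length : Nat) : Int) 0 = l := by
          rw [PySem.List.pyGetD_natCast]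
          have : (q' ++ [l]) ++ ([] ++ sh :: st) = q' ++ ([] ++ l :: (sh :: st)) := by simp
          rw [this]
          simpa using pv_getD_middle q' [] l (sh :: st)
        rw [hget] at hlt
        exact hq l (by simp) hlt
  | append_singleton r' b ih =>
    intro q s temp cm hs hr hq
    obtain ⟨sh, st, rfl⟩ : ∃ sh st, s = sh :: st := by
      cases s with | nil => exact absurd rfl hs | cons a t => exact ⟨a, t, rfl⟩
    have htb : temp < b := hr b (by simp)
    have hshape : q ++ ((r' ++ [b]) ++ sh :: st) = q ++ (r' ++ b :: sh :: st) := by simp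
    have hj : ((q.length : Int) + ((r' ++ [b]).length : Int) - 1) = ((q.length + r'.length : Nat) : Int) := by
      simp only [List.length_append, List.length_cons, List.length_nil]
      push_cast
      ring
    rw [pvInnerA, hshape, hj, dif_pos]
    · have hget : PySem.List.pyGetD (q ++ (r' ++ b :: sh :: st)) ((q.length + r'.length : Nat) : Int) 0 = b := by
        rw [PySem.List.pyGetD_natCast]; exact pv_getD_middle q r' b (sh :: st)
      have hset : PySem.List.pySetD (q ++ (r' ++ b :: sh :: st)) (((q.length + r'.length : Nat) : Int) + 1)
          (PySem.List.pyGetD (q ++ (r' ++ b :: sh :: st)) ((q.length + r'.length : Nat) : Int) 0)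
          = q ++ (r' ++ b :: b :: st) := by
        rw [hget, show (((q.length + r'.length : Nat) : Int) + 1) = ((q.length + r'.length + 1 : Nat) : Int) from by push_cast; ring,
           PySem.List.pySetD_natCast]
        exact pv_set_middle q r' b b sh st
      rw [hset]
      have hj2 : ((q.length + r'.length : Nat) : Int) - 1 = (q.length : Int) + (r'.length : Int) - 1 := by push_cast; ring
      rw [hj2]
      have := ih q (b :: b :: st) temp (cm + 1) (by simp)
        (fun x hx => hr x (by simp [hx])) hq
      rw [show q ++ (r' ++ b :: b :: st) = q ++ (r' ++ (b :: b :: st)) from by simp] at *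
      rw [this]
      refine Prod.ext ?_ (Prod.ext ?_ ?_)
      · cases r' <;> simp
      · simp
      · simp; ring
    · constructor
      · positivity
      · rw [PySem.List.pyGetD_natCast]
        rw [pv_getD_middle q r' b (sh :: st)]
        exact htb

theorem pvFindPos_eq (t : Int) (p : List Int) :
    pvFindPos p t = (p.takeWhile (fun y => !decide (t < y))).length := by
  induction p with
  | nil => rfl
  | cons a p ih =>
    by_cases h : t < a
    · simp [pvFindPos, h]
    · simp [pvFindPos, h, ih]

theorem pv_take_takeWhile (q : Int → Bool) (p : List Int) :
    List.take (List.takeWhile q p).length p = List.takeWhile q p := by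
  induction p with
  | nil => rfl
  | cons a p ih => by_cases h : q a <;> simp [h, ih]

theorem pv_drop_takeWhile (q : Int → Bool) (p : List Int) :
    List.drop (List.takeWhile q p).length p = List.dropWhile q p := by
  induction p with
  | nil => rfl
  | cons a p ih => by_cases h : q a <;> simp [h, ih]

-- B's insertion = split at the longest prefix of elements not greater than temp
theorem pvInsertSorted_eq (p : List Int) (t : Int) :
    pvInsertSorted p t
      = (p.takeWhile (fun y => !decide (t < y)) ++ t :: p.dropWhile (fun y => !decide (t < y)),
         ((p.dropWhile (fun y => !decide (t < y))).length : Int)) := by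
  have hfp := pvFindPos_eq t p
  have hlen : p.length = (p.takeWhile (fun y => !decide (t < y))).length
      + (p.dropWhile (fun y => !decide (t < y))).length := by
    rw [← List.length_append, List.takeWhile_append_dropWhile]
  simp only [pvInsertSorted, hfp]
  refine Prod.ext ?_ ?_
  · rw [pv_take_takeWhile, pv_drop_takeWhile]
  · simp; omega

theorem pv_dropWhile_gt (t : Int) (p : List Int) (hs : p.Pairwise (· ≤ ·)) :
    ∀ x ∈ p.dropWhile (fun y => !decide (t < y)), t < x := by
  induction p with
  | nil => simp
  | cons a p ih =>
    rw [List.pairwise_cons] at hs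
    by_cases h : t < a
    · intro x hx
      rw [List.dropWhile_cons_of_neg (by simp [h])] at hx
      rcases List.mem_cons.mp hx with rfl | hx
      · exact h
      · exact lt_of_lt_of_le h (hs.1 x hx)
    · intro x hx
      rw [List.dropWhile_cons_of_pos (by simp [h])] at hx
      exact ih hs.2 x hx

theorem pv_insert_sorted (t : Int) (p : List Int) (hs : p.Pairwise (· ≤ ·)) :
    (p.takeWhile (fun y => !decide (t < y)) ++ t :: p.dropWhile (fun y => !decide (t < y))).Pairwise (· ≤ ·) := by
  rw [List.pairwise_append]
  refine ⟨hs.sublist (List.takeWhile_sublist _), ?_, ?_⟩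
  · rw [List.pairwise_cons]
    exact ⟨fun x hx => le_of_lt (pv_dropWhile_gt t p hs x hx),
           hs.sublist (List.dropWhile_sublist _)⟩
  · intro x hx y hy
    have hxle : x ≤ t := by
      have := List.mem_takeWhile_imp hx
      simpa using this
    rcases List.mem_cons.mp hy with rfl | hy
    · exact hxle
    · exact le_of_lt (lt_of_le_of_lt hxle (pv_dropWhile_gt t p hs y hy))

-- main loop invariant: A's fold over indices |p| … |p|+|rest| on array p ++ rest
-- equals B's fold over rest with accumulator p, for sorted nonempty p
theorem pv_outer (rest : List Int) : ∀ (p : List Int) (cp cm : Int), p ≠ [] → p.Pairwise (· ≤ ·) →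
    (PySem.List.pyRange (p.length : Int) ((p.length + rest.length : Nat) : Int) 1).foldl pvStepA (p ++ rest, cp, cm)
      = rest.foldl pvStepB (p, cp, cm) := by
  induction rest with
  | nil =>
    intro p cp cm hne hs
    rw [PySem.List.pyRange_one_eq_nil (by simp)]
    simp
  | cons t rest ih =>
    intro p cp cm hne hs
    set q := p.takeWhile (fun y => !decide (t < y)) with hqdef
    set w := p.dropWhile (fun y => !decide (t < y)) with hwdef
    have hsplit : p = q ++ w := (List.takeWhile_append_dropWhile ..).symm
    have hplen : p.length = q.length + w.length := by rw [hsplit, List.length_append]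
    rw [PySem.List.pyRange_one_cons (by push_cast [List.length_cons]; omega), List.foldl_cons]
    have hstep : pvStepA (p ++ t :: rest, cp, cm) (p.length : Int)
        = ((q ++ t :: w) ++ rest, cp + 1, cm + (w.length : Int)) := by
      simp only [pvStepA]
      have hget : PySem.List.pyGetD (p ++ t :: rest) ((p.length : Nat) : Int) 0 = t := by
        rw [PySem.List.pyGetD_natCast]
        simpa using pv_getD_middle p [] t rest
      have hinner := pvInnerA_spec w q (t :: rest) t cm (by simp)
        (pv_dropWhile_gt t p hs)
        (fun l hl => by
          have hmem : l ∈ q := List.mem_of_getLast? hl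
          have := List.mem_takeWhile_imp hmem
          simpa using this)
      have harr : p ++ t :: rest = q ++ (w ++ (t :: rest)) := by rw [hsplit]; simp
      have hidx : (p.length : Int) - 1 = (q.length : Int) + (w.length : Int) - 1 := by
        rw [hplen]; push_cast; ring
      rw [hget, harr, hidx, hinner]
      simp only [List.tail_cons]
      have hw : PySem.List.pySetD (q ++ ((w ++ t :: rest).headD 0 :: (w ++ rest)))
          ((q.length : Int) - 1 + 1) t = (q ++ t :: w) ++ rest := by
        rw [show (q.length : Int) - 1 + 1 = ((q.length : Nat) : Int) from by ring,
            PySem.List.pySetD_natCast, pv_set_head q _ t (w ++ rest)]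
        simp
      rw [hw]
    rw [hstep]
    have hnext := ih (q ++ t :: w) (cp + 1) (cm + (w.length : Int)) (by simp)
      (pv_insert_sorted t p hs)
    have hlen2 : ((q ++ t :: w).length : Int) = (p.length : Int) + 1 := by
      simp [hplen]; ring
    have hlen3 : (q ++ t :: w).length + rest.length = p.length + (t :: rest).length := by
      simp [hplen]; omega
    rw [hlen3, hlen2] at hnext
    rw [hnext, List.foldl_cons]
    congr 1
    show _ = (_, _, _)
    rw [pvInsertSorted_eq]

-- ===== VERDICT (by name: the statement is the Claim_ definition above) =====
theorem to_insertion_counting_spec : Claim_equal_to_insertion_counting := by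
  intro lst copies comparisons _
  unfold Spec_to_insertion_counting
  cases lst with
  | nil => rfl
  | cons x rest =>
    show (PySem.List.pyRange 1 ((x :: rest).length : Int) 1).foldl pvStepA (x :: rest, copies, comparisons) = _
    have h := pv_outer rest [x] copies comparisons (by simp) (by simp)
    have e1 : (([x].length : Nat) : Int) = 1 := by simp
    have e2 : ((([x].length + rest.length : Nat) : Nat) : Int) = (((x :: rest).length : Nat) : Int) := by
      simp only [List.length_cons, List.length_nil]
      push_cast
      omega
    rw [e1, e2, List.singleton_append] at h
    exact h
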